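-- pv_equiv track=rewrite | github.com/SI-project/SI_Fuzzy | Fuzzy.py | get_fdnf
-- ===== SOURCE A (Python) =====
-- from copy import copy
--
-- def get_fdnf(cc,Q_t,index):
--     if index == len(Q_t): return [copy(cc)]
--     term = Q_t[index]
--     neg_t = "~"+term
--     if neg_t in cc or term in cc:
--         return get_fdnf(cc,Q_t,index+1)
--     else:
--         cc.append(neg_t)
--         l = get_fdnf(cc,Q_t,index+1)
--         cc.pop()
--         cc.append(term)
--         r= l + get_fdnf(cc,Q_t,index+1)
--         cc.pop()
--         return r
-- ===== SOURCE B (Python) =====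
-- def get_fdnf(cc, Q_t, index):
--     result = [list(cc)]
--     for i in range(index, len(Q_t)):
--         term = Q_t[i]
--         neg = "~" + term
--         new = []
--         for clause in result:
--             if neg in clause or term in clause:
--                 new.append(clause)
--             else:
--                 new.append(clause + [neg])
--                 new.append(clause + [term])
--         result = new
--     return result
-- ===== Notes on version B (the rewrite author's own statement) =====
-- stated objective: alternative
-- what changed: Replaces A's branching recursion with append/pop backtracking on a shared mutable clause by an iterative breadth-first expansion that maintains the explicit list of partial clauses and rewrites it once per term position.
import Mathlib
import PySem

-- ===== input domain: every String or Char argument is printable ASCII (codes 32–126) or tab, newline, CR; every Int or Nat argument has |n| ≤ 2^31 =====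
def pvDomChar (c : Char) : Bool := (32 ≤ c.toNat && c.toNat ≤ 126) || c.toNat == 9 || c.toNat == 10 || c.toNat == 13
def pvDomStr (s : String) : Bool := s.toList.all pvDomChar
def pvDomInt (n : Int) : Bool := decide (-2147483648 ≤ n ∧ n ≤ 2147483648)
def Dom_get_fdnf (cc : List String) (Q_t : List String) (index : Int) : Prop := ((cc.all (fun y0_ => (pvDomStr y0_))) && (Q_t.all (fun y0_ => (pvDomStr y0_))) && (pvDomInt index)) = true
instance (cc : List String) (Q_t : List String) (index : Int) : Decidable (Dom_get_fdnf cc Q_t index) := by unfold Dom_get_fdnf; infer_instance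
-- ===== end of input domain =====

-- B replaces A's backtracking recursion (append/pop on a shared clause) by an iterative
-- breadth-first expansion maintaining the explicit list of partial clauses; same cost,
-- different decomposition. A's temporary mutation of cc is restored before it returns,
-- so return-value equivalence is the whole story.

-- ===== PORT A =====
-- literal transliteration of A: recursion on index; cc.append/pop becomes passing cc ++ [x]
def get_fdnf (cc : List String) (Q_t : List String) (index : Int) : List (List String) :=
  if index = (Q_t.length : Int) then [cc]
  else
    match hg : PySem.List.pyGet? Q_t index with
    | none => []   -- Python raises IndexError here; excluded by Pre_
    | some term =>
      let neg_t := "~" ++ term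
      if neg_t ∈ cc ∨ term ∈ cc then get_fdnf cc Q_t (index + 1)
      else
        (get_fdnf (cc ++ [neg_t]) Q_t (index + 1)) ++ (get_fdnf (cc ++ [term]) Q_t (index + 1))
termination_by ((Q_t.length : Int) - index).toNat
decreasing_by
  all_goals
    have hin : PySem.Raise.InRange Q_t.length index := by
      by_contra hc
      rw [← PySem.List.pyGet?_eq_none_iff (xs := Q_t)] at hc
      simp [hg] at hc
    have := hin.2
    omega

-- ===== PORT B =====
-- literal transliteration of Source B: result = [list(cc)]; for i in range(index, len(Q_t)): rewrite result
def get_fdnf_alt (cc : List String) (Q_t : List String) (index : Int) : List (List String) :=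
  (PySem.List.pyRange index (Q_t.length : Int) 1).foldl
    (fun result i =>
      match PySem.List.pyGet? Q_t i with
      | none => result   -- Python raises IndexError here; excluded by Pre_
      | some term =>
        let neg := "~" ++ term
        result.foldl
          (fun new clause =>
            if neg ∈ clause ∨ term ∈ clause then new ++ [clause]
            else (new ++ [clause ++ [neg]]) ++ [clause ++ [term]])
          [])
    [cc]

-- ===== PRECONDITION & SPEC =====
-- Pre_ excludes exactly the inputs where Python A raises IndexError (index out of range).
def Pre_get_fdnf (cc : List String) (Q_t : List String) (index : Int) : Prop :=
  -(Q_t.length : Int) ≤ index ∧ index ≤ (Q_t.length : Int)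
instance (cc : List String) (Q_t : List String) (index : Int) : Decidable (Pre_get_fdnf cc Q_t index) := by unfold Pre_get_fdnf; infer_instance
def pvWitness_get_fdnf : List String × List String × Int := (["a"], ["p", "q"], 0)

def Spec_get_fdnf (cc : List String) (Q_t : List String) (index : Int) (out : List (List String)) : Prop := out = get_fdnf_alt cc Q_t index
instance (cc : List String) (Q_t : List String) (index : Int) (out : List (List String)) : Decidable (Spec_get_fdnf cc Q_t index out) := by unfold Spec_get_fdnf; infer_instance

-- ===== CLAIM (what is proved, stated in full; the proofs are below) =====
def Claim_equal_get_fdnf : Prop := ∀ (cc : List String) (Q_t : List String) (index : Int), Dom_get_fdnf cc Q_t index → Pre_get_fdnf cc Q_t index → Spec_get_fdnf cc Q_t index (get_fdnf cc Q_t index)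

-- ===== LEMMAS AND PROOFS =====

-- the per-clause expansion B performs at one term
def pvStep (term : String) (clause : List String) : List (List String) :=
  if ("~" ++ term) ∈ clause ∨ term ∈ clause then [clause]
  else [clause ++ ["~" ++ term], clause ++ [term]]

-- B's whole loop body at position i, acting on the clause list
def pvBody (Q_t : List String) (result : List (List String)) (i : Int) : List (List String) :=
  match PySem.List.pyGet? Q_t i with
  | none => result
  | some term =>
    let neg := "~" ++ term
    result.foldl
      (fun new clause =>
        if neg ∈ clause ∨ term ∈ clause then new ++ [clause]
        else (new ++ [clause ++ [neg]]) ++ [clause ++ [term]])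
      []

lemma get_fdnf_alt_eq_foldl (cc : List String) (Q_t : List String) (index : Int) :
    get_fdnf_alt cc Q_t index
      = (PySem.List.pyRange index (Q_t.length : Int) 1).foldl (pvBody Q_t) [cc] := by
  rfl

lemma pvInner_eq_flatMap (term : String) (L acc : List (List String)) :
    L.foldl
      (fun new clause =>
        if ("~" ++ term) ∈ clause ∨ term ∈ clause then new ++ [clause]
        else new ++ [clause ++ ["~" ++ term], clause ++ [term]])
      acc = acc ++ L.flatMap (pvStep term) := by
  induction L generalizing acc with
  | nil => simp
  | cons c L ih =>
    simp only [List.foldl_cons, List.flatMap_cons, ih, pvStep]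
    split_ifs <;> simp

lemma pvBody_append (Q_t : List String) (i : Int) (L1 L2 : List (List String)) :
    pvBody Q_t (L1 ++ L2) i = pvBody Q_t L1 i ++ pvBody Q_t L2 i := by
  unfold pvBody
  cases PySem.List.pyGet? Q_t i with
  | none => rfl
  | some term => simp [pvInner_eq_flatMap]

lemma pvLoop_append (Q_t : List String) (R : List Int) (L1 L2 : List (List String)) :
    R.foldl (pvBody Q_t) (L1 ++ L2)
      = R.foldl (pvBody Q_t) L1 ++ R.foldl (pvBody Q_t) L2 := by
  induction R generalizing L1 L2 with
  | nil => rfl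
  | cons i R ih => simp only [List.foldl_cons, pvBody_append, ih]

lemma pvMain (Q_t : List String) (n : Nat) :
    ∀ (index : Int) (cc : List String),
      -(Q_t.length : Int) ≤ index → index ≤ (Q_t.length : Int) →
      ((Q_t.length : Int) - index).toNat = n →
      get_fdnf cc Q_t index
        = (PySem.List.pyRange index (Q_t.length : Int) 1).foldl (pvBody Q_t) [cc] := by
  induction n with
  | zero =>
    intro index cc h1 h2 hn
    have hix : index = (Q_t.length : Int) := by omega
    subst hix
    rw [get_fdnf]
    simp
  | succ n ih =>
    intro index cc h1 h2 hn
    have hlt : index < (Q_t.length : Int) := by omega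
    have hcons : PySem.List.pyRange index (Q_t.length : Int) 1
        = index :: PySem.List.pyRange (index + 1) (Q_t.length : Int) 1 :=
      PySem.List.pyRange_one_cons hlt
    rw [get_fdnf, if_neg (by omega), hcons]
    cases hg : PySem.List.pyGet? Q_t index with
    | none =>
      exfalso
      rw [PySem.List.pyGet?_eq_none_iff] at hg
      exact hg ⟨h1, hlt⟩
    | some term =>
      simp only [List.foldl_cons]
      have hbody : pvBody Q_t [cc] index
          = if ("~" ++ term) ∈ cc ∨ term ∈ cc then [cc]
            else [cc ++ ["~" ++ term], cc ++ [term]] := by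
        unfold pvBody
        rw [hg]
        simp
      by_cases hc : ("~" ++ term) ∈ cc ∨ term ∈ cc
      · rw [if_pos hc, hbody, if_pos hc]
        exact ih (index + 1) cc (by omega) (by omega) (by omega)
      · rw [if_neg hc, hbody, if_neg hc]
        have : ([cc ++ ["~" ++ term], cc ++ [term]] : List (List String))
            = [cc ++ ["~" ++ term]] ++ [cc ++ [term]] := rfl
        rw [this, pvLoop_append,
          ih (index + 1) (cc ++ ["~" ++ term]) (by omega) (by omega) (by omega),
          ih (index + 1) (cc ++ [term]) (by omega) (by omega) (by omega)]

-- ===== VERDICT (by name: the statement is the Claim_ definition above) =====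
theorem get_fdnf_spec : Claim_equal_get_fdnf := by
  intro cc Q_t index _ hpre
  unfold Spec_get_fdnf
  rw [get_fdnf_alt_eq_foldl]
  exact pvMain Q_t (((Q_t.length : Int) - index).toNat) index cc hpre.1 hpre.2 rfl
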